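-- pv_equiv track=rewrite | github.com/UpendraKatara127/Hangman-QLearning | demo.py | create_char_counters
-- ===== SOURCE A (Python) =====
-- from collections import defaultdict
-- from collections import Counter
--
-- def create_char_counters(words):
--     char_counters = defaultdict(Counter)
--     for word in words:
--         total_counter = Counter(word.lower())
--         for char in word.lower():
--             tmp = total_counter.copy()
--             tmp[char] -= 1
--             char_counters[char] = tmp
--     return char_counters
-- ===== SOURCE B (Python) =====
-- from collections import defaultdict
-- from collections import Counter
--
-- def create_char_counters(words):
--     # Index pass: winner[char] = last word whose lowercase form contains char,
--     # keyed in first-appearance order (same as A's dict order).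
--     winner = {}
--     for word in words:
--         for char in word.lower():
--             winner[char] = word
--     # Build each counter exactly once per distinct char.
--     result = defaultdict(Counter)
--     for char, word in winner.items():
--         c = Counter(word.lower())
--         c[char] -= 1
--         result[char] = c
--     return result
-- ===== Notes on version B (the rewrite author's own statement) =====
-- stated objective: faster
-- what changed: B first builds a winner index mapping each char to the last word containing it, then constructs one counter per distinct char, instead of copying a fresh counter at every character occurrence.
import Mathlib
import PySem

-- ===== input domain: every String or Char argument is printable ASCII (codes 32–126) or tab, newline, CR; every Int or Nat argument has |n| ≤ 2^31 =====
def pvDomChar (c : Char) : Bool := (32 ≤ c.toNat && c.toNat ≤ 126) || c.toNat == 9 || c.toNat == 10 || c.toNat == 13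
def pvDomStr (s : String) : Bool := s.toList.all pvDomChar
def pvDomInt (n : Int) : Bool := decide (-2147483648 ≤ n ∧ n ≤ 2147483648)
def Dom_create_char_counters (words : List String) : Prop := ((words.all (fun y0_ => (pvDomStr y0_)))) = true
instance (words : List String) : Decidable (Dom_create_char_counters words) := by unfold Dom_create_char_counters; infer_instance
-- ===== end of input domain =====

-- B replaces A's per-character counter copies by a winner index plus one counter per distinct char (constant-factor objective).

-- ===== PORT A =====
-- A: for each word, Counter(word.lower()); for each char of word.lower(), a copy with that char
-- decremented is assigned to char_counters[char].  Counters are Dicts returned as item lists.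
def create_char_counters (words : List String) : List (String × List (String × Int)) :=
  (words.foldl (fun char_counters word =>
      let w : List String := (PySem.Str.lower word).toList.map (fun c => String.singleton c)
      let total_counter : PySem.Dict String Int := PySem.Dict.counter w
      w.foldl (fun char_counters char =>
          let tmp := total_counter.modify char 0 (· - 1)   -- tmp[char] -= 1 on a copy
          char_counters.insert char tmp.items) char_counters)
    (PySem.Dict.empty : PySem.Dict String (List (String × Int)))).items

-- ===== PORT B =====
-- B: first pass builds winner : char -> last word containing it; second pass builds each counter once.
def create_char_counters_alt (words : List String) : List (String × List (String × Int)) :=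
  let winner : PySem.Dict String String :=
    words.foldl (fun winner word =>
        ((PySem.Str.lower word).toList.map (fun c => String.singleton c)).foldl
          (fun winner char => winner.insert char word) winner)
      PySem.Dict.empty
  (winner.items.foldl (fun result p =>
      let c := PySem.Dict.counter ((PySem.Str.lower p.2).toList.map (fun c => String.singleton c))
      let c2 := c.modify p.1 0 (· - 1)                    -- c[char] -= 1
      result.insert p.1 c2.items)
    (PySem.Dict.empty : PySem.Dict String (List (String × Int)))).items

-- ===== PRECONDITION & SPEC =====
def Spec_create_char_counters (words : List String) (out : List (String × List (String × Int))) : Prop := out = create_char_counters_alt words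
instance (words : List String) (out : List (String × List (String × Int))) : Decidable (Spec_create_char_counters words out) := by unfold Spec_create_char_counters; infer_instance

-- ===== CLAIM (what is proved, stated in full; the proofs are below) =====
def Claim_equal_create_char_counters : Prop := ∀ (words : List String), Dom_create_char_counters words → Spec_create_char_counters words (create_char_counters words)

-- ===== LEMMAS AND PROOFS =====

-- the counter B stores for (char, word): Counter(word.lower()) with char decremented, as items
def pvG (char word : String) : List (String × Int) :=
  ((PySem.Dict.counter ((PySem.Str.lower word).toList.map (fun c => String.singleton c))).modify char 0 (· - 1)).items

-- apply pvG entrywise to the winner dict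
def pvMapG (wn : PySem.Dict String String) : PySem.Dict String (List (String × Int)) :=
  PySem.Dict.mk (wn.items.map (fun p => (p.1, pvG p.1 p.2)))

theorem pvMapG_insert (wn : PySem.Dict String String) (k word : String) :
    pvMapG (wn.insert k word) = (pvMapG wn).insert k (pvG k word) := by
  apply PySem.Dict.ext
  have hc : (PySem.Dict.mk (wn.items.map (fun p => (p.1, pvG p.1 p.2)))).contains k = wn.contains k := by
    simp [PySem.Dict.contains, Function.comp_def]
  simp only [pvMapG, PySem.Dict.items_insert, hc]
  by_cases h : wn.contains k = true
  · simp only [h, if_true, List.map_map]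
    apply List.map_congr_left
    intro p _
    by_cases hp : p.1 == k
    · have hk : p.1 = k := by simpa using hp
      simp [Function.comp, hk]
    · simp [Function.comp, hp]
  · simp [h]

theorem pv_inner (word : String) (l : List String) (wn : PySem.Dict String String) :
    l.foldl (fun acc char => acc.insert char (pvG char word)) (pvMapG wn)
      = pvMapG (l.foldl (fun wn char => wn.insert char word) wn) := by
  induction l generalizing wn with
  | nil => rfl
  | cons c t ih => simp only [List.foldl_cons, ← pvMapG_insert]; exact ih _

theorem pv_outer (words : List String) (wn : PySem.Dict String String) :
    words.foldl (fun char_counters word =>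
        (((PySem.Str.lower word).toList.map (fun c => String.singleton c)).foldl
          (fun char_counters char => char_counters.insert char (pvG char word))
          char_counters)) (pvMapG wn)
      = pvMapG (words.foldl (fun winner word =>
          ((PySem.Str.lower word).toList.map (fun c => String.singleton c)).foldl
            (fun winner char => winner.insert char word) winner) wn) := by
  induction words generalizing wn with
  | nil => rfl
  | cons w t ih =>
      simp only [List.foldl_cons]
      rw [pv_inner w _ wn]
      exact ih _

theorem pv_phase2 (wn : PySem.Dict String String) (h : wn.keys.Nodup) :
    (wn.items.foldl (fun result p => result.insert p.1 (pvG p.1 p.2))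
        (PySem.Dict.empty : PySem.Dict String (List (String × Int)))).items
      = (pvMapG wn).items := by
  rw [PySem.Dict.items_foldl_insert_fresh (k := fun p => p.1) (v := fun p => pvG p.1 p.2)
      (l := wn.items) (d := PySem.Dict.empty) (by intro a _; exact PySem.Dict.contains_empty _)
      (by simpa [PySem.Dict.keys] using h)]
  simp [pvMapG, PySem.Dict.empty]

theorem pv_nodup (words : List String) (wn : PySem.Dict String String) (h : wn.keys.Nodup) :
    (words.foldl (fun winner word =>
        ((PySem.Str.lower word).toList.map (fun c => String.singleton c)).foldl
          (fun winner char => winner.insert char word) winner) wn).keys.Nodup := by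
  induction words generalizing wn with
  | nil => exact h
  | cons w t ih =>
      exact ih _ (PySem.Dict.nodup_keys_foldl_insert _ (fun _ _ => w) _ h)

-- ===== VERDICT (by name: the statement is the Claim_ definition above) =====
theorem create_char_counters_spec : Claim_equal_create_char_counters := by
  intro words _
  have hnd := pv_nodup words PySem.Dict.empty PySem.Dict.nodup_keys_empty
  show create_char_counters words = create_char_counters_alt words
  change (List.foldl (fun char_counters word =>
      List.foldl (fun char_counters char => char_counters.insert char (pvG char word)) char_counters
        ((PySem.Str.lower word).toList.map (fun c => String.singleton c))) PySem.Dict.empty words).items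
    = (List.foldl (fun result p => result.insert p.1 (pvG p.1 p.2))
        (PySem.Dict.empty : PySem.Dict String (List (String × Int)))
        (List.foldl (fun winner word =>
          List.foldl (fun winner char => winner.insert char word) winner
            ((PySem.Str.lower word).toList.map (fun c => String.singleton c))) PySem.Dict.empty words).items).items
  rw [pv_phase2 _ hnd, ← pv_outer words PySem.Dict.empty]
  rfl
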